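-- pv_equiv track=rewrite | github.com/MainAI/RegExPhonebook | main.py | double_free
-- ===== SOURCE A (Python) =====
-- def double_free(list_modify):
--     """
--     Create dictionary with key = lastname, firstname; merge value with same key by data with same list index.
--     :param list_modify: list with double data
--     :return: double_free_list
--     """
--     dict_data = {}
--     for info in list_modify:
--         key = tuple(info[:2])
--         if dict_data.get(key) is None:
--             dict_data[key] = []
--         index_ = 0
--         for item in info:
--             value_list = dict_data[key]
--             if index_ < len(dict_data.get(key)):
--                 if value_list[index_] == "":
--                     value_list[index_] = item
--                     index_ += 1
--                 else:
--                     index_ += 1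
--             else:
--                 value_list.append(item)
--                 index_ += 1
--     double_free_list = list(dict_data.values())
--     return double_free_list
-- ===== SOURCE B (Python) =====
-- def double_free(list_modify):
--     # Group records by key, then merge each group column-wise:
--     # each output slot is the first non-empty value at that index.
--     grouped = {}
--     for info in list_modify:
--         grouped.setdefault(tuple(info[:2]), []).append(info)
--     result = []
--     for records in grouped.values():
--         width = max((len(r) for r in records), default=0)
--         result.append([next((r[i] for r in records if i < len(r) and r[i] != ""), "")
--                        for i in range(width)])
--     return result
-- ===== Notes on version B (the rewrite author's own statement) =====
-- stated objective: alternative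
-- what changed: Replaces A's in-place indexed merge loop (mutating the stored list item by item, overwriting empty slots) by a group-then-reduce decomposition: records are first grouped per key, then each group is merged column-wise, each output slot being the first non-empty value at that index.
import Mathlib
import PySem

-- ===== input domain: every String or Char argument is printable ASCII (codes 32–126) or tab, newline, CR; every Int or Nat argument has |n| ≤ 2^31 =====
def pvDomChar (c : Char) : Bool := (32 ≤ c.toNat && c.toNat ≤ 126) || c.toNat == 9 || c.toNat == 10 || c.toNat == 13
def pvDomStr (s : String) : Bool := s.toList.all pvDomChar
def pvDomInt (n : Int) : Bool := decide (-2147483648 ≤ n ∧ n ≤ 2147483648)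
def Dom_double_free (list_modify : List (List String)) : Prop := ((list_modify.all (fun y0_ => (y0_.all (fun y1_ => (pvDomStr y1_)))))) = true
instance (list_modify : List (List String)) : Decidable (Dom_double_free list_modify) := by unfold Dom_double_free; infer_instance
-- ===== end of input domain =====

-- B replaces A's in-place indexed merge loop by group-then-column-wise reduction
-- (first non-empty value per column); objective: alternative decomposition, same result.

-- ===== PORT A =====
-- inner 'for item in info' loop of A: d = dict_data, key, remaining items, index_
def pvAInner (key : List String) (d : PySem.Dict (List String) (List String)) :
    List String → Nat → PySem.Dict (List String) (List String)
  | [], _ => d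
  | item :: rest, idx =>
    let value_list := d.getD key []               -- dict_data[key] (key is always present here)
    if idx < value_list.length then
      if value_list.getD idx "" = "" then         -- value_list[index_] (in range)
        pvAInner key (d.insert key (value_list.set idx item)) rest (idx + 1)
      else
        pvAInner key d rest (idx + 1)
    else
      pvAInner key (d.insert key (value_list ++ [item])) rest (idx + 1)

def double_free (list_modify : List (List String)) : List (List String) :=
  let dict_data := list_modify.foldl (fun d info =>
    let key := info.take 2                        -- tuple(info[:2])
    let d := if (d.get? key).isNone then d.insert key [] else d
    pvAInner key d info 0) PySem.Dict.empty
  dict_data.values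

-- ===== PORT B =====
-- next((v for v in col if v != ""), "")
def pvFirstNonEmpty (col : List String) : String :=
  (col.find? (fun v => decide (v ≠ ""))).getD ""

-- merged = [first non-empty of column i for i in range(width)]
def pvMergeCols (records : List (List String)) : List String :=
  let width := (records.map List.length).foldl max 0   -- max((len(r) for r in records), default=0)
  (List.range width).map (fun i => pvFirstNonEmpty (records.map (fun r => r.getD i "")))

def double_free_alt (list_modify : List (List String)) : List (List String) :=
  let grouped := list_modify.foldl (fun g info =>
    let key := info.take 2
    g.insert key (g.getD key [] ++ [info])) PySem.Dict.empty   -- grouped.setdefault(key, []).append(info)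
  grouped.values.map pvMergeCols

-- ===== PRECONDITION & SPEC =====
def Spec_double_free (list_modify : List (List String)) (out : List (List String)) : Prop := out = double_free_alt list_modify
instance (list_modify : List (List String)) (out : List (List String)) : Decidable (Spec_double_free list_modify out) := by unfold Spec_double_free; infer_instance

-- ===== CLAIM (what is proved, stated in full; the proofs are below) =====
def Claim_equal_double_free : Prop := ∀ (list_modify : List (List String)), Dom_double_free list_modify → Spec_double_free list_modify (double_free list_modify)

-- ===== LEMMAS AND PROOFS =====

-- clean two-list merge: the effect of A's inner loop on the stored list
def mA : List String → List String → List String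
  | old, [] => old
  | [], it :: rest => it :: mA [] rest
  | o :: os, it :: rest => (if o = "" then it else o) :: mA os rest

theorem mA_nil (xs : List String) : mA [] xs = xs := by
  induction xs with
  | nil => rfl
  | cons x xs ih => simp [mA, ih]

theorem length_mA (a b : List String) : (mA a b).length = max a.length b.length := by
  induction b generalizing a with
  | nil => simp [mA]
  | cons it rest ih =>
    cases a with
    | nil => simp [mA, ih]
    | cons o os => simp [mA, ih]

theorem getD_mA (a b : List String) (i : Nat) :
    (mA a b).getD i "" = if a.getD i "" = "" then b.getD i "" else a.getD i "" := by
  induction b generalizing a i with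
  | nil => simp only [mA, List.getD_nil]; split <;> simp_all
  | cons it rest ih =>
    cases a with
    | nil =>
      cases i with
      | zero => simp [mA]
      | succ n => simpa [mA] using ih [] n
    | cons o os =>
      cases i with
      | zero => simp [mA]
      | succ n => simpa [mA] using ih os n

theorem firstNonEmpty_append (l : List String) (x : String) :
    pvFirstNonEmpty (l ++ [x]) = if pvFirstNonEmpty l = "" then x else pvFirstNonEmpty l := by
  unfold pvFirstNonEmpty
  rw [List.find?_append]
  cases h : l.find? (fun v => decide (v ≠ "")) with
  | none => by_cases hx : x = "" <;> simp [hx]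
  | some v =>
    have hv := List.find?_some h
    simp at hv
    simp [hv]

theorem colInv (rs : List (List String)) (i : Nat) :
    (rs.foldl mA []).getD i "" = pvFirstNonEmpty (rs.map (fun r => r.getD i "")) := by
  induction rs using List.reverseRecOn with
  | nil => simp [pvFirstNonEmpty]
  | append_singleton rs r ih =>
    rw [List.foldl_append, List.map_append]
    simp only [List.foldl_cons, List.foldl_nil, List.map_cons, List.map_nil]
    rw [getD_mA, firstNonEmpty_append, ih]

theorem lenInv (rs : List (List String)) :
    (rs.foldl mA []).length = (rs.map List.length).foldl max 0 := by
  induction rs using List.reverseRecOn with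
  | nil => simp
  | append_singleton rs r ih => simp [List.foldl_append, length_mA, ih]

theorem foldl_mA_eq_mergeCols (rs : List (List String)) : rs.foldl mA [] = pvMergeCols rs := by
  unfold pvMergeCols
  apply List.ext_getElem
  · simp [lenInv]
  · intro i h1 h2
    simp only [List.getElem_map, List.getElem_range]
    rw [← colInv]
    rw [List.getD_eq_getElem?_getD, List.getElem?_eq_getElem h1]
    rfl

theorem insert_self_of_get? {κ ν : Type} [BEq κ] [LawfulBEq κ] (d : PySem.Dict κ ν) {k : κ} {v : ν}
    (h : d.get? k = some v) (hnd : d.keys.Nodup) : d.insert k v = d := by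
  apply PySem.Dict.ext
  have hc : d.contains k = true := by rw [PySem.Dict.contains_eq_isSome_get?, h]; rfl
  rw [PySem.Dict.items_insert_of_contains d v hc]
  conv_rhs => rw [← List.map_id d.items]
  apply List.map_congr_left
  intro p hp
  obtain ⟨pk, pv⟩ := p
  by_cases hpk : pk = k
  · subst hpk
    have := PySem.Dict.get?_of_mem_items d hp hnd
    rw [h] at this
    simp_all
  · simp [hpk]

theorem keys_of_items_map (dA : PySem.Dict (List String) (List String))
    (dB : PySem.Dict (List String) (List (List String)))
    (hmap : dA.items = dB.items.map (fun p => (p.1, p.2.foldl mA []))) :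
    dA.keys = dB.keys := by
  simp only [PySem.Dict.keys, hmap, List.map_map]
  rfl

theorem get?_rel (dA : PySem.Dict (List String) (List String))
    (dB : PySem.Dict (List String) (List (List String)))
    (hmap : dA.items = dB.items.map (fun p => (p.1, p.2.foldl mA [])))
    (hnd : dB.keys.Nodup) (k : List String) :
    dA.get? k = (dB.get? k).map (List.foldl mA []) := by
  have hkeys := keys_of_items_map dA dB hmap
  have hndA : dA.keys.Nodup := hkeys ▸ hnd
  cases h : dB.get? k with
  | none =>
    have hk : k ∉ dB.keys := (PySem.Dict.get?_eq_none_iff_not_mem_keys dB k).mp h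
    rw [(PySem.Dict.get?_eq_none_iff_not_mem_keys dA k).mpr (hkeys ▸ hk)]
    rfl
  | some rs =>
    have hm := PySem.Dict.mem_items_of_get?_eq_some dB h
    have hmA : (k, rs.foldl mA []) ∈ dA.items := by
      rw [hmap]; exact List.mem_map.mpr ⟨(k, rs), hm, rfl⟩
    rw [PySem.Dict.get?_of_mem_items dA hmA hndA]
    rfl

theorem getD_append_length (pre : List String) (c : String) (cs : List String) :
    (pre ++ c :: cs).getD pre.length "" = c := by
  rw [List.getD_eq_getElem?_getD, List.getElem?_append_right (le_refl _)]
  simp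

theorem set_append_length (pre : List String) (c x : String) (cs : List String) :
    (pre ++ c :: cs).set pre.length x = pre ++ x :: cs := by
  induction pre with
  | nil => rfl
  | cons p ps ih => simp [ih]

theorem pvAInner_eq (key : List String) (items : List String) :
    ∀ (pre cur : List String) (d : PySem.Dict (List String) (List String)),
    d.keys.Nodup → d.get? key = some (pre ++ cur) →
    pvAInner key d items pre.length = d.insert key (pre ++ mA cur items) := by
  induction items with
  | nil =>
    intro pre cur d hnd hget
    simp only [pvAInner, mA]
    exact (insert_self_of_get? d hget hnd).symm
  | cons item rest ih =>
    intro pre cur d hnd hget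
    have hvl : d.getD key [] = pre ++ cur := by
      rw [PySem.Dict.getD_eq_get?_getD, hget]; rfl
    cases cur with
    | nil =>
      have hlt : ¬ (pre.length < (d.getD key []).length) := by simp [hvl]
      rw [pvAInner]
      simp only [hlt, if_false]
      have hget2 : (d.insert key (d.getD key [] ++ [item])).get? key
          = some ((pre ++ [item]) ++ ([] : List String)) := by
        rw [PySem.Dict.get?_insert_self, hvl]; simp
      have := ih (pre ++ [item]) [] _ (PySem.Dict.nodup_keys_insert d key _ hnd) hget2
      simp only [List.length_append, List.length_cons, List.length_nil] at this
      rw [this, PySem.Dict.insert_insert_self]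
      simp [mA, mA_nil]
    | cons c cs =>
      have hlt : pre.length < (d.getD key []).length := by simp [hvl]
      rw [pvAInner]
      simp only [hlt, if_true]
      by_cases hc : (d.getD key []).getD pre.length "" = ""
      · have hcc : c = "" := by rw [hvl, getD_append_length] at hc; exact hc
        subst hcc
        simp only [hvl, getD_append_length, set_append_length]
        have hget2 : (d.insert key (pre ++ item :: cs)).get? key
            = some ((pre ++ [item]) ++ cs) := by
          rw [PySem.Dict.get?_insert_self]; simp
        have := ih (pre ++ [item]) cs _ (PySem.Dict.nodup_keys_insert d key _ hnd) hget2
        simp only [List.length_append, List.length_cons, List.length_nil] at this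
        rw [this, PySem.Dict.insert_insert_self]
        simp [mA]
      · simp only [hvl, getD_append_length] at hc ⊢
        simp only [hc, if_false]
        have hget2 : d.get? key = some ((pre ++ [c]) ++ cs) := by rw [hget]; simp
        have := ih (pre ++ [c]) cs d hnd hget2
        simp only [List.length_append, List.length_cons, List.length_nil] at this
        rw [this]
        simp [mA, hc]

theorem stepA_eq (d : PySem.Dict (List String) (List String)) (info : List String)
    (hnd : d.keys.Nodup) :
    (let key := info.take 2
     let d2 := if (d.get? key).isNone then d.insert key [] else d
     pvAInner key d2 info 0) = d.insert (info.take 2) (mA (d.getD (info.take 2) []) info) := by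
  cases h : d.get? (info.take 2) with
  | none =>
    simp only [h, Option.isNone_none, if_true]
    have hget2 : (d.insert (info.take 2) []).get? (info.take 2)
        = some (([] : List String) ++ ([] : List String)) := by
      rw [PySem.Dict.get?_insert_self]; rfl
    have := pvAInner_eq (info.take 2) info [] [] _
      (PySem.Dict.nodup_keys_insert d _ _ hnd) hget2
    simp only [List.length_nil] at this
    rw [this, PySem.Dict.insert_insert_self]
    rw [PySem.Dict.getD_eq_get?_getD, h]
    simp [mA_nil]
  | some old =>
    simp only [h, Option.isNone_some, Bool.false_eq_true, if_false]
    have hget2 : d.get? (info.take 2) = some (([] : List String) ++ old) := by simpa using h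
    have := pvAInner_eq (info.take 2) info [] old d hnd hget2
    simp only [List.length_nil] at this
    rw [this]
    rw [PySem.Dict.getD_eq_get?_getD, h]
    rfl

theorem step_items (dA : PySem.Dict (List String) (List String))
    (dB : PySem.Dict (List String) (List (List String)))
    (hnd : dB.keys.Nodup)
    (hmap : dA.items = dB.items.map (fun p => (p.1, p.2.foldl mA [])))
    (info : List String) :
    (dA.insert (info.take 2) (mA (dA.getD (info.take 2) []) info)).items
      = (dB.insert (info.take 2) (dB.getD (info.take 2) [] ++ [info])).items.map
          (fun p => (p.1, p.2.foldl mA [])) := by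
  have hrel := get?_rel dA dB hmap hnd (info.take 2)
  have hva : dA.getD (info.take 2) [] = (dB.getD (info.take 2) []).foldl mA [] := by
    rw [PySem.Dict.getD_eq_get?_getD, PySem.Dict.getD_eq_get?_getD, hrel]
    cases dB.get? (info.take 2) <;> rfl
  have hcc : dA.contains (info.take 2) = dB.contains (info.take 2) := by
    rw [PySem.Dict.contains_eq_isSome_get?, PySem.Dict.contains_eq_isSome_get?, hrel]
    cases dB.get? (info.take 2) <;> rfl
  by_cases hc : dB.contains (info.take 2) = true
  · rw [PySem.Dict.items_insert_of_contains _ _ (hcc ▸ hc),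
        PySem.Dict.items_insert_of_contains _ _ hc, hmap, List.map_map, List.map_map]
    apply List.map_congr_left
    intro p _
    simp only [Function.comp_apply]
    by_cases hpk : (p.1 == info.take 2) = true
    · simp only [hpk, if_true]
      rw [List.foldl_append, hva]
      rfl
    · simp only [hpk, Bool.false_eq_true, if_false]
  · have hc' : dB.contains (info.take 2) = false := by simp at hc; exact hc
    have hcA : dA.contains (info.take 2) = false := hcc.trans hc'
    have hgB : dB.get? (info.take 2) = none := by
      cases h : dB.get? (info.take 2) with
      | none => rfl
      | some v => rw [PySem.Dict.contains_eq_isSome_get?, h] at hc'; simp at hc'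
    rw [PySem.Dict.items_insert_of_not_contains _ _ hcA,
        PySem.Dict.items_insert_of_not_contains _ _ hc', hmap, List.map_append]
    have hgDB : dB.getD (info.take 2) [] = [] := by
      rw [PySem.Dict.getD_eq_get?_getD, hgB]; rfl
    simp [hva, hgDB, mA_nil]

theorem foldInv (l : List (List String)) :
    ∀ (dA : PySem.Dict (List String) (List String))
      (dB : PySem.Dict (List String) (List (List String))),
    dB.keys.Nodup →
    dA.items = dB.items.map (fun p => (p.1, p.2.foldl mA [])) →
    (l.foldl (fun d info =>
        let key := info.take 2
        let d := if (d.get? key).isNone then d.insert key [] else d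
        pvAInner key d info 0) dA).items
      = (l.foldl (fun g info =>
          let key := info.take 2
          g.insert key (g.getD key [] ++ [info])) dB).items.map (fun p => (p.1, p.2.foldl mA []))
    ∧ (l.foldl (fun g info =>
          let key := info.take 2
          g.insert key (g.getD key [] ++ [info])) dB).keys.Nodup := by
  induction l with
  | nil => intro dA dB hnd hmap; exact ⟨hmap, hnd⟩
  | cons info rest ih =>
    intro dA dB hnd hmap
    have hndA : dA.keys.Nodup := (keys_of_items_map dA dB hmap) ▸ hnd
    simp only [List.foldl_cons]
    apply ih
    · exact PySem.Dict.nodup_keys_insert dB _ _ hnd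
    · rw [stepA_eq dA info hndA]
      exact step_items dA dB hnd hmap info

-- ===== VERDICT (by name: the statement is the Claim_ definition above) =====
theorem double_free_spec : Claim_equal_double_free := by
  unfold Claim_equal_double_free Spec_double_free
  intro l _
  unfold double_free double_free_alt
  obtain ⟨hitems, _⟩ := foldInv l PySem.Dict.empty PySem.Dict.empty
    PySem.Dict.nodup_keys_empty (by rfl)
  simp only [PySem.Dict.values, hitems, List.map_map]
  apply List.map_congr_left
  intro p _
  simpa [Function.comp] using foldl_mA_eq_mergeCols p.2
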